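-- pv_equiv track=rewrite | github.com/zack256/bool-tester | bool-tester/bool_tester.py | get_variables
-- ===== SOURCE A (Python) =====
-- import string
--
-- def get_variables(expression):
--     s = set(); d = {}
--     for i in expression:
--         if i in string.ascii_letters:
--             s.add(i)
--     l = sorted(s)
--     for c, el in enumerate(l):
--         d[el] = c
--     return d
-- ===== SOURCE B (Python) =====
-- import string
--
-- def get_variables(expression):
--     present = set(expression)
--     d = {}
--     counter = 0
--     for ch in sorted(string.ascii_letters):
--         if ch in present:
--             d[ch] = counter
--             counter += 1
--     return d
-- ===== Notes on version B (the rewrite author's own statement) =====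
-- stated objective: alternative
-- what changed: Instead of collecting the letters of the expression into a set (testing each character against ascii_letters) and then sorting and enumerating them, B builds set(expression) once and scans the fixed 52-letter alphabet in sorted ASCII order with a running counter, so no per-character substring test and no sort of the discovered letters is performed.
import Mathlib
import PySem

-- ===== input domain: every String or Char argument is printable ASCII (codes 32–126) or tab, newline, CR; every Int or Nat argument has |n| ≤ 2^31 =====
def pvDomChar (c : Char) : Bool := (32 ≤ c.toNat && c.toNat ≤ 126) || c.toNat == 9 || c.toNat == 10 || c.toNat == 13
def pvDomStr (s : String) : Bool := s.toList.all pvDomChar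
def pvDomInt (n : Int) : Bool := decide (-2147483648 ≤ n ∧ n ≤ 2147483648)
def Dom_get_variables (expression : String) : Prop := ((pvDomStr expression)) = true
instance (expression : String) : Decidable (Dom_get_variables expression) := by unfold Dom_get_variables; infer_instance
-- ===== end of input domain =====

-- B replaces A's collect-letters/sort/enumerate pipeline by a single counter-driven scan of the
-- fixed alphabet in sorted ASCII order; this file proves the two return the same dict on every input.

-- ===== PORT A =====
-- string.ascii_letters
def pvAsciiLetters : List Char := "abcdefghijklmnopqrstuvwxyzABCDEFGHIJKLMNOPQRSTUVWXYZ".toList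

def get_variables (expression : String) : List (String × Int) :=
  -- s = set(); for i in expression: if i in string.ascii_letters: s.add(i)
  let s : PySem.Set Char :=
    expression.toList.foldl
      (fun s i => if PySem.Chars.isIn [i] pvAsciiLetters then PySem.Set.add s i else s)
      PySem.Set.empty
  -- l = sorted(s)   (the set holds one-character strings, which sort exactly as their characters)
  let l := PySem.List.sorted s (fun x => x) false
  -- d = {}; for c, el in enumerate(l): d[el] = c
  let d : PySem.Dict String Int :=
    (PySem.List.enumerate l 0).foldl
      (fun d ce => d.insert (String.ofList [ce.2]) ce.1)
      PySem.Dict.empty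
  d.items

-- ===== PORT B =====
def get_variables_alt (expression : String) : List (String × Int) :=
  -- present = set(expression)
  let present : PySem.Set Char := PySem.Set.ofList expression.toList
  -- d = {}; counter = 0; for ch in sorted(string.ascii_letters): if ch in present: d[ch] = counter; counter += 1
  let r :=
    (PySem.List.sorted pvAsciiLetters (fun x => x) false).foldl
      (fun (st : PySem.Dict String Int × Int) ch =>
        if PySem.Set.contains present ch then (st.1.insert (String.ofList [ch]) st.2, st.2 + 1)
        else st)
      (PySem.Dict.empty, 0)
  r.1.items

-- ===== PRECONDITION & SPEC =====
def Spec_get_variables (expression : String) (out : List (String × Int)) : Prop := out = get_variables_alt expression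
instance (expression : String) (out : List (String × Int)) : Decidable (Spec_get_variables expression out) := by unfold Spec_get_variables; infer_instance

-- ===== CLAIM (what is proved, stated in full; the proofs are below) =====
def Claim_equal_get_variables : Prop := ∀ (expression : String), Dom_get_variables expression → Spec_get_variables expression (get_variables expression)

-- ===== LEMMAS AND PROOFS =====

-- the one-character string key both ports build
def pvKey (c : Char) : String := String.ofList [c]

theorem pvKey_inj : Function.Injective pvKey := by
  intro a b h
  have := congrArg String.toList h
  simpa [pvKey] using this

-- A's letter set is the ordered set of the letters occurring in the expression
theorem pvSetA (expression : String) :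
    expression.toList.foldl
      (fun s i => if PySem.Chars.isIn [i] pvAsciiLetters then PySem.Set.add s i else s)
      PySem.Set.empty
    = PySem.Set.ofList (expression.toList.filter (fun i => PySem.Chars.isIn [i] pvAsciiLetters)) := by
  rw [PySem.List.foldl_if_eq_foldl_filter, PySem.Set.ofList_eq_foldl]
  rfl

-- the sorted alphabet B scans
def pvSortedAlpha : List Char := PySem.List.sorted pvAsciiLetters (fun x => x) false

-- sorting A's letter set = filtering the sorted alphabet by presence in the expression
theorem pvSorted_eq (expression : String) :
    PySem.List.sorted
      (PySem.Set.ofList (expression.toList.filter (fun i => PySem.Chars.isIn [i] pvAsciiLetters)))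
      (fun x => x) false
    = pvSortedAlpha.filter (fun c => PySem.Set.contains (PySem.Set.ofList expression.toList) c) := by
  have halpha : pvSortedAlpha.Pairwise (fun a b => a ≤ b) := by decide
  have hnda : pvSortedAlpha.Nodup := by decide
  apply PySem.List.eq_of_perm_of_pairwise_le_of_injective (key := fun x => x)
    (fun a b h => h)
  · refine (PySem.List.sorted_perm ..).trans ?_
    refine (List.perm_ext_iff_of_nodup (PySem.Set.nodup_ofList _) (hnda.filter _)).mpr ?_
    intro x
    rw [PySem.Set.mem_ofList, List.mem_filter, List.mem_filter]
    have h1 : (PySem.Chars.isIn [x] pvAsciiLetters = true) ↔ x ∈ pvAsciiLetters := by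
      rw [PySem.Chars.isIn_iff_infix, List.singleton_infix_iff]
    have h2 : PySem.Set.contains (PySem.Set.ofList expression.toList) x = true ↔ x ∈ expression.toList := by
      rw [PySem.Set.contains_iff, PySem.Set.mem_ofList]
    have h3 : x ∈ pvSortedAlpha ↔ x ∈ pvAsciiLetters := PySem.List.mem_sorted ..
    rw [h1, h2, h3]
    tauto
  · exact PySem.List.sorted_pairwise ..
  · exact List.Pairwise.sublist List.filter_sublist halpha

-- A's enumerate loop over a duplicate-free list of letters builds the index dict pairwise
theorem pvFoldA (l : List Char) (hnd : (l.map pvKey).Nodup) :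
    ((PySem.List.enumerate l 0).foldl
      (fun (d : PySem.Dict String Int) ce => d.insert (pvKey ce.2) ce.1)
      PySem.Dict.empty).items
    = (PySem.List.enumerate l 0).map (fun ce => (pvKey ce.2, ce.1)) := by
  have hmap : (PySem.List.enumerate l 0).map (fun ce => pvKey ce.2) = l.map pvKey := by
    rw [show (fun (ce : Int × Char) => pvKey ce.2) = pvKey ∘ (·.2) from rfl, ← List.map_map,
      PySem.List.map_snd_enumerate]
  have h1 : ∀ a ∈ PySem.List.enumerate l 0,
      (PySem.Dict.empty : PySem.Dict String Int).contains (pvKey a.2) = false := by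
    intro a _; rfl
  have := PySem.Dict.items_foldl_insert_fresh (l := PySem.List.enumerate l 0)
    (k := fun ce => pvKey ce.2) (v := fun ce => ce.1) (d := PySem.Dict.empty)
    h1 (hmap ▸ hnd)
  simpa using this

-- B's counter loop over fresh distinct keys builds exactly the same enumerate dict
theorem pvFoldB (l : List Char) (d : PySem.Dict String Int) (n : Int)
    (hfresh : ∀ c ∈ l, d.contains (pvKey c) = false) (hnd : (l.map pvKey).Nodup) :
    ((l.foldl (fun (st : PySem.Dict String Int × Int) ch =>
        (st.1.insert (pvKey ch) st.2, st.2 + 1)) (d, n)).1).items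
    = d.items ++ (PySem.List.enumerate l n).map (fun ce => (pvKey ce.2, ce.1)) := by
  induction l generalizing d n with
  | nil => simp [PySem.List.enumerate_nil]
  | cons c t ih =>
    have hc : d.contains (pvKey c) = false := hfresh c (List.mem_cons_self ..)
    simp only [List.foldl_cons]
    rw [ih (d.insert (pvKey c) n) (n + 1) ?_ ?_]
    · rw [PySem.Dict.items_insert_of_not_contains (h := hc), PySem.List.enumerate_cons]
      simp
    · intro x hx
      rw [PySem.Dict.contains_insert]
      have hne : pvKey x ≠ pvKey c := by
        simp only [List.map_cons, List.nodup_cons] at hnd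
        intro h; exact hnd.1 (h ▸ List.mem_map_of_mem hx)
      simp [hne, hfresh x (List.mem_cons_of_mem _ hx)]
    · simp only [List.map_cons, List.nodup_cons] at hnd; exact hnd.2

-- ===== VERDICT (by name: the statement is the Claim_ definition above) =====
theorem get_variables_spec : Claim_equal_get_variables := by
  intro expression _
  unfold Spec_get_variables
  simp only [get_variables, get_variables_alt]
  rw [pvSetA, pvSorted_eq]
  -- the common filtered, sorted, duplicate-free letter list
  set F := pvSortedAlpha.filter
    (fun c => PySem.Set.contains (PySem.Set.ofList expression.toList) c) with hF
  have hndF : (F.map pvKey).Nodup := by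
    refine List.Nodup.map pvKey_inj (List.Nodup.filter _ ?_)
    decide
  have hA := pvFoldA F hndF
  simp only [pvKey] at hA
  have hB := pvFoldB F PySem.Dict.empty 0 (fun c _ => rfl) hndF
  simp only [pvKey] at hB
  rw [show (PySem.List.sorted pvAsciiLetters (fun x => x) false) = pvSortedAlpha from rfl,
    PySem.List.foldl_if_eq_foldl_filter]
  rw [hA, hB]
  rfl
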